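-- pv_equiv track=rewrite | github.com/pypi-data/pypi-mirror-342 | packages/hashboard-cli/hashboard_cli-3.2.4.tar.gz/hashboard_cli-3.2.4/src/hashboard/dbt/dbt_properties.py | _insert_yaml_block
-- ===== SOURCE A (Python) =====
-- def _insert_yaml_block(
--     yaml_content: str,
--     start_line: int,
--     new_block: str,
--     replace_existing=False,
--     insert_nested=False,
-- ):
--     """
--     Replace a YAML block in a string and return the modified string.
--
--     Args:
--         yaml_content: The original YAML content as a string
--         nested_key_path: The nested path to the key to replace (dot-separated)
--         new_block: The new YAML block to insert
--         replace_existing: If False, new_block will be inserted. If True, new_block will replace the existing block at this line.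
--
--     Returns:
--         A tuple containing:
--         - The modified YAML content as a string
--         - A boolean indicating whether the replacement was successful
--
--     Raises:
--         ValueError: If the nested key is not found in the YAML content
--     """
--     # Get the indentation level of the key
--     target_indentation = _get_block_indentation(yaml_content, start_line, insert_nested)
--     # Prepare the new block with proper indentation
--     indented_block = "\n".join(
--         " " * target_indentation + line for line in new_block.strip().split("\n")
--     )
--
--     # Process the content line by line
--     lines = yaml_content.split("\n")
--     new_lines = []
--     in_block = False
--
--     for i, line in enumerate(lines, 1):
--         if i == start_line:
--             # Add the new block
--             if replace_existing:
--                 in_block = True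
--             else:
--                 new_lines.append(line)
--             new_lines.append(indented_block)
--
--         elif in_block:
--             # Check if we're still in the block to be replaced
--             line_indentation = len(line) - len(line.lstrip())
--             if not line.strip() or line_indentation > target_indentation:
--                 continue  # Skip lines in the original block
--             else:
--                 in_block = False
--                 new_lines.append(line)
--         else:
--             new_lines.append(line)
--
--     return "\n".join(new_lines)
--
-- def _get_block_indentation(content: str, line_number: int, insert_nested: bool) -> int:
--     lines = content.split("\n")
--     if 0 <= line_number - 1 < len(lines):
--         line_content = lines[line_number - 1]
--         indent = len(line_content) - len(line_content.lstrip())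
--         if line_content.lstrip().startswith("-"):
--             indent += 2
--         if insert_nested:
--             indent += 2
--         return indent
--     return 0
-- ===== SOURCE B (Python) =====
-- def _insert_yaml_block(
--     yaml_content,
--     start_line,
--     new_block,
--     replace_existing=False,
--     insert_nested=False,
-- ):
--     lines = yaml_content.split("\n")
--     if not (1 <= start_line <= len(lines)):
--         return yaml_content
--     idx = start_line - 1
--     stripped = lines[idx].lstrip()
--     indent = len(lines[idx]) - len(stripped)
--     if stripped.startswith("-"):
--         indent += 2
--     if insert_nested:
--         indent += 2
--     block = "\n".join(" " * indent + l for l in new_block.strip().split("\n"))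
--     if replace_existing:
--         j = idx + 1
--         while j < len(lines) and (
--             not lines[j].strip()
--             or len(lines[j]) - len(lines[j].lstrip()) > indent
--         ):
--             j += 1
--         out = lines[:idx] + [block] + lines[j:]
--     else:
--         out = lines[: idx + 1] + [block] + lines[idx + 1 :]
--     return "\n".join(out)
-- ===== Notes on version B (the rewrite author's own statement) =====
-- stated objective: simpler
-- what changed: Replaces A's enumerate loop carrying an in_block flag over every line by an out-of-range early return plus list slicing: take/drop around the start line, with an explicit forward scan for the first line that ends the replaced block.
import Mathlib
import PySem

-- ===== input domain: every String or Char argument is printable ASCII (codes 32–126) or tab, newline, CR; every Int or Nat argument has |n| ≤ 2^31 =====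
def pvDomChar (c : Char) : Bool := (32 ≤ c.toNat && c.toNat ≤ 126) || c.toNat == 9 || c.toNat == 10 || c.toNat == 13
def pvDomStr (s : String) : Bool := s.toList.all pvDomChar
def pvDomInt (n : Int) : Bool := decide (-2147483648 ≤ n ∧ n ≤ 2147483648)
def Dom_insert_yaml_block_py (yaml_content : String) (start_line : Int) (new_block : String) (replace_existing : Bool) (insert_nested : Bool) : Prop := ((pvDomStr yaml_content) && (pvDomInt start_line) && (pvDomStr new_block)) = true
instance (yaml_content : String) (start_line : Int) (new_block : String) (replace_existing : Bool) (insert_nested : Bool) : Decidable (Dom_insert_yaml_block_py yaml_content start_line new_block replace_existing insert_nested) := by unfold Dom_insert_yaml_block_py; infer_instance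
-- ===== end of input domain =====

-- B replaces A's flag-carrying enumerate loop by an out-of-range early return plus slice arithmetic:
-- take/drop around the start line, with an explicit forward scan for the end of the replaced block.


-- shared tiny helper: Python's `len(line) - len(line.lstrip())`
def pvLineIndent (line : String) : Int :=
  PySem.Str.len line - PySem.Str.len (PySem.Str.lstrip line)

-- ===== PORT A =====
-- port of _get_block_indentation
def get_block_indentation_py (content : String) (line_number : Int) (insert_nested : Bool) : Int :=
  let lines := List.map String.ofList (PySem.Chars.splitOn content.toList ['\n'])
  if 0 ≤ line_number - 1 ∧ line_number - 1 < (lines.length : Int) then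
    let line_content := lines.getD (line_number - 1).toNat ""
    let indent := pvLineIndent line_content
    let indent := if PySem.Str.startswith (PySem.Str.lstrip line_content) "-" then indent + 2 else indent
    if insert_nested then indent + 2 else indent
  else 0

-- the `for i, line in enumerate(lines, 1)` loop, state = (new_lines, in_block)
def pvLoopA (start_line : Int) (target : Int) (blk : String) (replace_existing : Bool) :
    List String → Int → List String × Bool → List String × Bool
  | [], _, st => st
  | line :: rest, i, (new_lines, in_block) =>
    pvLoopA start_line target blk replace_existing rest (i + 1) <|
      if i = start_line then
        if replace_existing then (new_lines ++ [blk], true)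
        else (new_lines ++ [line, blk], in_block)
      else if in_block then
        if PySem.Str.strip line = "" ∨ pvLineIndent line > target then (new_lines, in_block)
        else (new_lines ++ [line], false)
      else (new_lines ++ [line], in_block)

def insert_yaml_block_py (yaml_content : String) (start_line : Int) (new_block : String) (replace_existing : Bool) (insert_nested : Bool) : String :=
  let target := get_block_indentation_py yaml_content start_line insert_nested
  let indented_block := PySem.Str.join "\n"
    ((PySem.Chars.splitOn (PySem.Str.strip new_block).toList ['\n']).map
      (fun l => String.ofList (List.replicate target.toNat ' ' ++ l)))
  let lines := List.map String.ofList (PySem.Chars.splitOn yaml_content.toList ['\n'])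
  PySem.Str.join "\n" (pvLoopA start_line target indented_block replace_existing lines 1 ([], false)).1

-- ===== PORT B =====
-- B's `while` scan: number of leading lines that are blank or indented deeper than `indent`
def pvScanStop (indent : Int) : List String → Nat
  | [] => 0
  | l :: rest =>
    if PySem.Str.strip l = "" ∨ pvLineIndent l > indent then pvScanStop indent rest + 1 else 0

def insert_yaml_block_py_alt (yaml_content : String) (start_line : Int) (new_block : String) (replace_existing : Bool) (insert_nested : Bool) : String :=
  let lines := List.map String.ofList (PySem.Chars.splitOn yaml_content.toList ['\n'])
  if 1 ≤ start_line ∧ start_line ≤ (lines.length : Int) then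
    let idx := (start_line - 1).toNat
    let stripped := PySem.Str.lstrip (lines.getD idx "")
    let indent := pvLineIndent (lines.getD idx "")
    let indent := if PySem.Str.startswith stripped "-" then indent + 2 else indent
    let indent := if insert_nested then indent + 2 else indent
    let block := PySem.Str.join "\n"
      ((PySem.Chars.splitOn (PySem.Str.strip new_block).toList ['\n']).map
        (fun l => String.ofList (List.replicate indent.toNat ' ' ++ l)))
    let out :=
      if replace_existing then
        lines.take idx ++ [block] ++ lines.drop (idx + 1 + pvScanStop indent (lines.drop (idx + 1)))
      else
        lines.take (idx + 1) ++ [block] ++ lines.drop (idx + 1)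
    PySem.Str.join "\n" out
  else yaml_content

-- ===== PRECONDITION & SPEC =====
def Spec_insert_yaml_block_py (yaml_content : String) (start_line : Int) (new_block : String) (replace_existing : Bool) (insert_nested : Bool) (out : String) : Prop := out = insert_yaml_block_py_alt yaml_content start_line new_block replace_existing insert_nested
instance (yaml_content : String) (start_line : Int) (new_block : String) (replace_existing : Bool) (insert_nested : Bool) (out : String) : Decidable (Spec_insert_yaml_block_py yaml_content start_line new_block replace_existing insert_nested out) := by unfold Spec_insert_yaml_block_py; infer_instance

-- ===== CLAIM (what is proved, stated in full; the proofs are below) =====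
def Claim_equal_insert_yaml_block_py : Prop := ∀ (yaml_content : String) (start_line : Int) (new_block : String) (replace_existing : Bool) (insert_nested : Bool), Dom_insert_yaml_block_py yaml_content start_line new_block replace_existing insert_nested → Spec_insert_yaml_block_py yaml_content start_line new_block replace_existing insert_nested (insert_yaml_block_py yaml_content start_line new_block replace_existing insert_nested)

-- ===== LEMMAS AND PROOFS =====

-- `sep.join` over a cons with nonempty tail
theorem pvJoin_cons (sep x : List Char) (ys : List (List Char)) (h : ys ≠ []) :
    PySem.Chars.join sep (x :: ys) = x ++ sep ++ PySem.Chars.join sep ys := by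
  cases ys with
  | nil => simp at h
  | cons y zs => simp [PySem.Chars.join, List.intercalate, List.intersperse]

-- `sep.join` over a snoc
theorem pvJoin_snoc (sep q : List Char) (ps : List (List Char)) (h : ps ≠ []) :
    PySem.Chars.join sep (ps ++ [q]) = PySem.Chars.join sep ps ++ sep ++ q := by
  induction ps with
  | nil => simp at h
  | cons a tl ih =>
    rw [List.cons_append, pvJoin_cons sep a (tl ++ [q]) (by simp)]
    cases tl with
    | nil => simp [PySem.Chars.join, List.intercalate]
    | cons b tl2 =>
      rw [ih (by simp), pvJoin_cons sep a (b :: tl2) (by simp)]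
      simp [List.append_assoc]

-- invariant of splitOn.go for a single-character separator
theorem pvSplitOnGo_join (c : Char) (l cur : List Char) (acc : List (List Char)) (fuel : Nat)
    (hf : l.length ≤ fuel) :
    PySem.Chars.join [c] (PySem.Chars.splitOn.go [c] fuel l cur acc) =
      (if acc = [] then [] else PySem.Chars.join [c] acc.reverse ++ [c]) ++ cur.reverse ++ l := by
  induction l generalizing fuel cur acc with
  | nil =>
    have hres : PySem.Chars.splitOn.go [c] fuel [] cur acc = (cur.reverse :: acc).reverse := by
      cases fuel <;> simp [PySem.Chars.splitOn.go]
    rw [hres, List.reverse_cons]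
    rcases acc with _ | ⟨a, tl⟩
    · simp [PySem.Chars.join, List.intercalate]
    · rw [pvJoin_snoc _ _ _ (by simp)]
      simp
  | cons c' rest ih =>
    cases fuel with
    | zero => simp at hf
    | succ f =>
      simp only [PySem.Chars.splitOn.go]
      by_cases hpre : List.isPrefixOf [c] (c' :: rest)
      · have hc : c' = c := by
          have := hpre
          simp [List.isPrefixOf] at this
          exact this.symm
        rw [if_pos hpre, show List.drop (List.length [c]) (c' :: rest) = rest by simp,
          ih [] (cur.reverse :: acc) f (by simpa using Nat.le_of_succ_le_succ hf)]
        rw [if_neg (by simp), List.reverse_cons]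
        rcases acc with _ | ⟨a, tl⟩
        · simp [PySem.Chars.join, List.intercalate, hc]
        · rw [pvJoin_snoc _ _ _ (by simp)]
          simp [hc]
      · rw [if_neg hpre, ih (c' :: cur) acc f (by simpa using Nat.le_of_succ_le_succ hf)]
        simp

theorem pvSplitOn_join (c : Char) (s : List Char) :
    PySem.Chars.join [c] (PySem.Chars.splitOn s [c]) = s := by
  unfold PySem.Chars.splitOn
  rw [pvSplitOnGo_join c s [] [] (s.length + 1) (by omega)]
  simp

-- the split/join roundtrip at the String level, as used by the ports
theorem pvRoundtrip (s : String) :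
    PySem.Str.join "\n" (List.map String.ofList (PySem.Chars.splitOn s.toList ['\n'])) = s := by
  unfold PySem.Str.join
  rw [List.map_map]
  have h1 : (String.toList ∘ String.ofList) = id := by funext l; simp
  rw [h1, List.map_id]
  have h : ("\n" : String).toList = ['\n'] := rfl
  rw [h, pvSplitOn_join, String.ofList_toList]

-- A's loop over an appended list
theorem pvLoopA_append (s t : Int) (b : String) (r : Bool) (xs ys : List String) (i : Int)
    (st : List String × Bool) :
    pvLoopA s t b r (xs ++ ys) i st =
      pvLoopA s t b r ys (i + xs.length) (pvLoopA s t b r xs i st) := by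
  induction xs generalizing i st with
  | nil => simp [pvLoopA]
  | cons x tl ih =>
    obtain ⟨nl, ib⟩ := st
    simp only [List.cons_append, pvLoopA, ih, List.length_cons]
    rw [show (i + ↑(tl.length + 1) : Int) = i + 1 + ↑tl.length by push_cast; ring]

-- A's loop out of block, over lines whose 1-based index never equals start_line: pure copy
theorem pvLoopA_miss (s t : Int) (b : String) (r : Bool) (xs : List String) (i : Int)
    (acc : List String) (h : ∀ k : Nat, k < xs.length → i + k ≠ s) :
    pvLoopA s t b r xs i (acc, false) = (acc ++ xs, false) := by
  induction xs generalizing i acc with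
  | nil => simp [pvLoopA]
  | cons x tl ih =>
    have hi : i ≠ s := by have := h 0 (by simp); simpa using this
    rw [show pvLoopA s t b r (x :: tl) i (acc, false) = pvLoopA s t b r tl (i + 1) (acc ++ [x], false) by
      simp [pvLoopA, hi]]
    rw [ih (i + 1) (acc ++ [x]) (fun k hk => by
      have := h (k + 1) (by simpa using Nat.succ_lt_succ hk)
      push_cast at this ⊢; omega)]
    simp

-- A's loop inside the replaced block: skips exactly pvScanStop lines, then copies
theorem pvLoopA_inblock (s t : Int) (b : String) (r : Bool) (xs : List String) (i : Int)
    (acc : List String) (h : ∀ k : Nat, k < xs.length → i + k ≠ s) :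
    (pvLoopA s t b r xs i (acc, true)).1 = acc ++ xs.drop (pvScanStop t xs) := by
  induction xs generalizing i acc with
  | nil => simp [pvLoopA]
  | cons x tl ih =>
    have hi : i ≠ s := by have := h 0 (by simp); simpa using this
    have hnext : ∀ k : Nat, k < tl.length → (i + 1) + (k : Int) ≠ s := fun k hk => by
      have := h (k + 1) (by simpa using Nat.succ_lt_succ hk)
      push_cast at this ⊢; omega
    by_cases hc : PySem.Str.strip x = "" ∨ pvLineIndent x > t
    · rw [show pvLoopA s t b r (x :: tl) i (acc, true) = pvLoopA s t b r tl (i + 1) (acc, true) by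
        simp [pvLoopA, hi, hc]]
      rw [ih (i + 1) acc hnext]
      simp [pvScanStop, hc]
    · rw [show pvLoopA s t b r (x :: tl) i (acc, true) = pvLoopA s t b r tl (i + 1) (acc ++ [x], false) by
        simp [pvLoopA, hi, hc]]
      rw [pvLoopA_miss s t b r tl (i + 1) (acc ++ [x]) hnext]
      simp [pvScanStop, hc]

-- the whole of A's loop, in range: B's two slice forms
theorem pvLoopA_main (s tgt : Int) (blk : String) (r : Bool) (L : List String)
    (h1 : 1 ≤ s) (h2 : s ≤ (L.length : Int)) :
    (pvLoopA s tgt blk r L 1 ([], false)).1 =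
      if r then
        L.take (s - 1).toNat ++ [blk] ++
          L.drop ((s - 1).toNat + 1 + pvScanStop tgt (L.drop ((s - 1).toNat + 1)))
      else
        L.take ((s - 1).toNat + 1) ++ [blk] ++ L.drop ((s - 1).toNat + 1) := by
  set idx := (s - 1).toNat with hidxdef
  have hs : s = (idx : Int) + 1 := by omega
  have hidx : idx < L.length := by omega
  have hsplit : L = L.take idx ++ (L[idx] :: L.drop (idx + 1)) := by
    rw [List.getElem_cons_drop, List.take_append_drop]
  have hlen : (L.take idx).length = idx := List.length_take_of_le (by omega)
  rw [show (pvLoopA s tgt blk r L 1 ([], false)) =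
      pvLoopA s tgt blk r (L.take idx ++ (L[idx] :: L.drop (idx + 1))) 1 ([], false) by
    rw [← hsplit]]
  rw [pvLoopA_append]
  rw [pvLoopA_miss s tgt blk r _ 1 [] (fun k hk => by rw [hlen] at hk; omega)]
  rw [hlen]
  rw [show pvLoopA s tgt blk r (L[idx] :: L.drop (idx + 1)) (1 + ↑idx) ([] ++ L.take idx, false) =
      pvLoopA s tgt blk r (L.drop (idx + 1)) (1 + ↑idx + 1)
        (if r then (L.take idx ++ [blk], true) else (L.take idx ++ [L[idx], blk], false)) by
    simp only [pvLoopA, List.nil_append]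
    rw [if_pos (by omega : (1 : Int) + ↑idx = s)]]
  cases r with
  | true =>
    rw [if_pos rfl, if_pos rfl]
    rw [pvLoopA_inblock s tgt blk true _ _ _ (fun k hk => by omega)]
    have hd : List.drop (idx + 1 + pvScanStop tgt (List.drop (idx + 1) L)) L
        = List.drop (pvScanStop tgt (List.drop (idx + 1) L)) (List.drop (idx + 1) L) := by
      rw [List.drop_drop, Nat.add_comm (idx + 1)]
    rw [hd, List.append_assoc]
  | false =>
    rw [if_neg (by simp), if_neg (by simp)]
    rw [pvLoopA_miss s tgt blk false _ _ _ (fun k hk => by omega)]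
    rw [List.take_add_one, List.getElem?_eq_getElem hidx]
    simp only [Option.toList_some, List.append_assoc, List.cons_append, List.nil_append]

-- ===== VERDICT (by name: the statement is the Claim_ definition above) =====
theorem insert_yaml_block_py_spec : Claim_equal_insert_yaml_block_py := by
  intro y s nb r ins _
  unfold Spec_insert_yaml_block_py
  simp only [insert_yaml_block_py, insert_yaml_block_py_alt, get_block_indentation_py]
  by_cases hin : 1 ≤ s ∧ s ≤ ((List.map String.ofList (PySem.Chars.splitOn y.toList ['\n'])).length : Int)
  · rw [if_pos hin, if_pos (by omega : (0:Int) ≤ s - 1 ∧ s - 1 < ((List.map String.ofList (PySem.Chars.splitOn y.toList ['\n'])).length : Int))]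
    rw [pvLoopA_main _ _ _ _ _ hin.1 hin.2]
  · rw [if_neg hin]
    rw [pvLoopA_miss _ _ _ _ _ _ _ (fun k hk => by
      rcases not_and_or.mp hin with h | h <;> omega)]
    simpa using pvRoundtrip y
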